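-- pv_equiv track=rewrite | github.com/tennyson-mccalla/SuperNavigator | navigator-main/skills/backend-endpoint/functions/route_validator.py | suggest_valid_path
-- ===== SOURCE A (Python) =====
-- def suggest_valid_path(path):
--     """
--     Suggest a valid route path if the provided one is invalid.
--
--     Args:
--         path: Invalid route path
--
--     Returns:
--         str: Suggested valid path
--     """
--     # Remove trailing slash
--     if path.endswith('/') and len(path) > 1:
--         path = path.rstrip('/')
--
--     # Fix double slashes
--     while '//' in path:
--         path = path.replace('//', '/')
--
--     # Convert to lowercase and replace underscores
--     segments = path.split('/')
--     fixed_segments = []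
--     for segment in segments:
--         if segment.startswith(':') or (segment.startswith('{') and segment.endswith('}')):
--             fixed_segments.append(segment)
--         else:
--             fixed_segments.append(segment.lower().replace('_', '-'))
--
--     suggested = '/'.join(fixed_segments)
--
--     # Ensure starts with /
--     if not suggested.startswith('/'):
--         suggested = '/' + suggested
--
--     return suggested
-- ===== SOURCE B (Python) =====
-- def suggest_valid_path(path):
--     """Suggest a valid route path: split into segments, drop empty ones, rebuild."""
--     segments = [s for s in path.split('/') if s]
--     processed = []
--     for s in segments:
--         if s.startswith(':') or (s.startswith('{') and s.endswith('}')):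
--             processed.append(s)
--         else:
--             processed.append(s.lower().replace('_', '-'))
--     return '/' + '/'.join(processed)
-- ===== Notes on version B (the rewrite author's own statement) =====
-- stated objective: simpler
-- what changed: B drops A's trailing-slash strip and the repeated double-slash collapse loop entirely: it splits the raw path on the separator, filters out empty segments in one pass, applies the same per-segment transform, and prepends a single leading slash.
import Mathlib
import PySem

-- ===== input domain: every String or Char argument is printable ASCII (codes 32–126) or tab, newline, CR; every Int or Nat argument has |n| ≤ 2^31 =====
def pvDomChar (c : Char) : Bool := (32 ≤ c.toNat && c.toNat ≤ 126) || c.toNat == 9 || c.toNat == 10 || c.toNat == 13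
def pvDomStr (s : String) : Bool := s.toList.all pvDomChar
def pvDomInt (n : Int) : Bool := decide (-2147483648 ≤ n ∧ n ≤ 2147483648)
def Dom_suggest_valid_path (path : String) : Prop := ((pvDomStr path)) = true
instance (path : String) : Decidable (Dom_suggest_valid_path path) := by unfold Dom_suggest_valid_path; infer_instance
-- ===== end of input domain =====

-- B replaces A's strip-trailing-slash + while-loop double-slash collapse + split strategy by a single split-then-filter pass (simpler); same return value on every string.

-- ===== PORT A =====
-- per-segment transform, the same expression in both Pythons:
-- `seg if seg.startswith(':') or (seg.startswith('{') and seg.endswith('}')) else seg.lower().replace('_','-')`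
def pvFixSegment (seg : List Char) : List Char :=
  if PySem.Chars.startswith seg [':'] || (PySem.Chars.startswith seg ['{'] && PySem.Chars.endswith seg ['}']) then seg
  else PySem.Chars.replace (PySem.Chars.lower seg) ['_'] ['-']

-- `while '//' in path: path = path.replace('//', '/')`; the fuel only makes the loop total
-- (each replace of a present '//' strictly shortens the string, so fuel = length + 1 is never exhausted).
def pvCollapse : Nat → List Char → List Char
  | 0, l => l
  | fuel + 1, l =>
    if PySem.Chars.isIn ['/', '/'] l then pvCollapse fuel (PySem.Chars.replace l ['/', '/'] ['/'])
    else l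

def suggest_valid_path (path : String) : String :=
  let p0 := path.toList
  -- if path.endswith('/') and len(path) > 1: path = path.rstrip('/')
  -- rstrip('/') ported by hand (no PySem primitive): drop every trailing '/' — exact
  let p1 := if PySem.Chars.endswith p0 ['/'] && decide (1 < p0.length)
            then (p0.reverse.dropWhile (· == '/')).reverse else p0
  let p2 := pvCollapse (p1.length + 1) p1
  let segments := PySem.Chars.splitOn p2 ['/']
  let fixed := segments.map pvFixSegment
  let suggested := PySem.Chars.join ['/'] fixed
  String.ofList (if PySem.Chars.startswith suggested ['/'] then suggested else '/' :: suggested)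

-- ===== PORT B =====
def suggest_valid_path_alt (path : String) : String :=
  let segments := (PySem.Chars.splitOn path.toList ['/']).filter (fun s => !s.isEmpty)
  String.ofList ('/' :: PySem.Chars.join ['/'] (segments.map pvFixSegment))

-- ===== PRECONDITION & SPEC =====
def Spec_suggest_valid_path (path : String) (out : String) : Prop := out = suggest_valid_path_alt path
instance (path : String) (out : String) : Decidable (Spec_suggest_valid_path path out) := by unfold Spec_suggest_valid_path; infer_instance

-- ===== CLAIM (what is proved, stated in full; the proofs are below) =====
def Claim_equal_suggest_valid_path : Prop := ∀ (path : String), Dom_suggest_valid_path path → Spec_suggest_valid_path path (suggest_valid_path path)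

-- ===== LEMMAS AND PROOFS =====

-- Model of `split('/')` as a plain structural recursion.
def pvSplit : List Char → List (List Char)
  | [] => [[]]
  | c :: t => if c = '/' then [] :: pvSplit t else (pvSplit t).modifyHead (c :: ·)

-- Model of one `replace('//', '/')` pass.
def pvRepl : List Char → List Char
  | [] => []
  | [c] => [c]
  | c :: d :: t => if c = '/' ∧ d = '/' then '/' :: pvRepl t else c :: pvRepl (d :: t)

-- the non-empty segments of a string: the quantity both programs preserve
def pvSegs (l : List Char) : List (List Char) := (pvSplit l).filter (fun s => !s.isEmpty)

lemma pvSplit_ne_nil (l : List Char) : pvSplit l ≠ [] := by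
  cases l with
  | nil => simp [pvSplit]
  | cons c t =>
    simp only [pvSplit]
    split
    · simp
    · cases h : pvSplit t with
      | nil => exact absurd h (pvSplit_ne_nil t)
      | cons a as => simp

lemma head_singleton_prefix_iff (l : List Char) (c : Char) : [c] <+: l ↔ l.head? = some c := by
  cases l with
  | nil => simp
  | cons a t => simp [List.cons_prefix_cons, eq_comm]

lemma last_singleton_suffix_iff (l : List Char) (c : Char) : [c] <:+ l ↔ l.getLast? = some c := by
  rw [← List.reverse_prefix]
  cases h : l.reverse with
  | nil => simp_all
  | cons a t =>
    have h2 : l.getLast? = some a := by rw [← List.head?_reverse]; simp [h]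
    simp [List.cons_prefix_cons, eq_comm, h2]

lemma startswith_slash_iff (l : List Char) :
    PySem.Chars.startswith l ['/'] = true ↔ l.head? = some '/' := by
  rw [PySem.Chars.startswith_iff, head_singleton_prefix_iff]

lemma endswith_slash_iff (l : List Char) :
    PySem.Chars.endswith l ['/'] = true ↔ l.getLast? = some '/' := by
  rw [PySem.Chars.endswith_iff, last_singleton_suffix_iff]

lemma splitOn_go_eq (fuel : Nat) (l cur : List Char) (acc : List (List Char))
    (h : l.length < fuel) :
    PySem.Chars.splitOn.go ['/'] fuel l cur acc =
      acc.reverse ++ (pvSplit l).modifyHead (cur.reverse ++ ·) := by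
  induction fuel generalizing l cur acc with
  | zero => omega
  | succ n ih =>
    cases l with
    | nil => simp [PySem.Chars.splitOn.go, pvSplit]
    | cons c rest =>
      by_cases hc : c = '/'
      · subst hc
        have hpre : List.isPrefixOf ['/'] ('/' :: rest) = true := by
          simp [List.isPrefixOf]
        rw [PySem.Chars.splitOn.go]
        simp only [hpre, if_true, List.length_cons, List.length_nil, List.drop_succ_cons,
          List.drop_zero]
        rw [ih rest [] (cur.reverse :: acc) (by simpa using Nat.lt_of_succ_lt_succ h)]
        cases hs : pvSplit rest <;> simp [pvSplit, hs]
      · have hpre : List.isPrefixOf ['/'] (c :: rest) = false := by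
          simp [List.isPrefixOf]; intro hh; exact absurd hh.symm hc
        rw [PySem.Chars.splitOn.go]
        simp only [hpre, Bool.false_eq_true, if_false]
        rw [ih rest (c :: cur) acc (by simpa using Nat.lt_of_succ_lt_succ h)]
        simp only [pvSplit, hc, if_false]
        cases hsp : pvSplit rest with
        | nil => exact absurd hsp (pvSplit_ne_nil rest)
        | cons a as => simp

lemma splitOn_eq_pvSplit (l : List Char) : PySem.Chars.splitOn l ['/'] = pvSplit l := by
  rw [PySem.Chars.splitOn, splitOn_go_eq _ _ _ _ (Nat.lt_succ_self _)]
  cases h : pvSplit l with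
  | nil => exact absurd h (pvSplit_ne_nil l)
  | cons a as => simp

lemma replace_go_eq (fuel : Nat) (l acc : List Char) (h : l.length ≤ fuel) :
    PySem.Chars.replace.go ['/', '/'] ['/'] fuel l acc = acc.reverse ++ pvRepl l := by
  induction fuel generalizing l acc with
  | zero =>
    have : l = [] := by cases l <;> simp_all
    subst this
    simp [PySem.Chars.replace.go, pvRepl]
  | succ n ih =>
    cases l with
    | nil => simp [PySem.Chars.replace.go, pvRepl]
    | cons c rest =>
      cases rest with
      | nil =>
        have hpre : List.isPrefixOf ['/', '/'] [c] = false := by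
          cases hc : c == '/' <;> simp [List.isPrefixOf]
        rw [PySem.Chars.replace.go]
        simp only [hpre, Bool.false_eq_true, if_false]
        rw [ih [] (c :: acc) (by simp)]
        simp [pvRepl]
      | cons d t =>
        by_cases hcd : c = '/' ∧ d = '/'
        · obtain ⟨hc, hd⟩ := hcd
          subst hc; subst hd
          have hpre : List.isPrefixOf ['/', '/'] ('/' :: '/' :: t) = true := by
            simp [List.isPrefixOf]
          rw [PySem.Chars.replace.go]
          simp only [hpre, if_true, List.length_cons, List.length_nil, List.drop_succ_cons,
            List.drop_zero]
          rw [ih t (['/'].reverse ++ acc) (by simp at h ⊢; omega)]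
          simp [pvRepl]
        · have hpre : List.isPrefixOf ['/', '/'] (c :: d :: t) = false := by
            simp [List.isPrefixOf]
            intro h1 h2
            exact hcd ⟨h1.symm, h2.symm⟩
          rw [PySem.Chars.replace.go]
          simp only [hpre, Bool.false_eq_true, if_false]
          rw [ih (d :: t) (c :: acc) (by simp at h ⊢; omega)]
          simp [pvRepl, hcd]

lemma replace_eq_pvRepl (l : List Char) :
    PySem.Chars.replace l ['/', '/'] ['/'] = pvRepl l := by
  rw [PySem.Chars.replace]
  simp only [List.isEmpty_cons, Bool.false_eq_true, if_false]
  rw [replace_go_eq _ _ _ (Nat.le_refl _)]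
  simp

lemma pvRepl_ne_nil (l : List Char) (h : l ≠ []) : pvRepl l ≠ [] := by
  induction l using pvRepl.induct with
  | case1 => exact absurd rfl h
  | case2 c => simp [pvRepl]
  | case3 c d t h1 ih => simp [pvRepl, h1]
  | case4 c d t h1 ih => simp [pvRepl, h1]

lemma length_pvRepl_le (l : List Char) : (pvRepl l).length ≤ l.length := by
  induction l using pvRepl.induct with
  | case1 => simp [pvRepl]
  | case2 c => simp [pvRepl]
  | case3 c d t h1 ih => simp only [pvRepl, h1, and_self, if_true]; simp; omega
  | case4 c d t h1 ih =>
    simp only [pvRepl, h1, if_false]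
    simp at ih ⊢
    omega

lemma length_pvRepl_lt (l : List Char) (h : ['/', '/'] <:+: l) :
    (pvRepl l).length < l.length := by
  induction l using pvRepl.induct with
  | case1 => simp at h
  | case2 c =>
    exfalso
    have := h.length_le
    simp at this
  | case3 c d t h1 ih =>
    simp only [pvRepl, h1, and_self, if_true]
    have := length_pvRepl_le t
    simp; omega
  | case4 c d t h1 ih =>
    simp only [pvRepl, h1, if_false]
    have hinf : ['/', '/'] <:+: (d :: t) := by
      obtain ⟨u, v, huv⟩ := h
      cases u with
      | nil =>
        simp at huv
        exact absurd ⟨huv.1.symm, huv.2.1.symm⟩ h1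
      | cons x u' =>
        simp at huv
        exact ⟨u', v, by simpa using huv.2⟩
    have := ih hinf
    simp at this ⊢
    omega

lemma filter_eq_of_head_tail (x y : List (List Char)) (hx : x ≠ []) (hy : y ≠ [])
    (h1 : x.headI = y.headI)
    (h2 : x.tail.filter (fun s => !s.isEmpty) = y.tail.filter (fun s => !s.isEmpty)) :
    x.filter (fun s => !s.isEmpty) = y.filter (fun s => !s.isEmpty) := by
  cases x with
  | nil => exact absurd rfl hx
  | cons a as =>
    cases y with
    | nil => exact absurd rfl hy
    | cons b bs =>
      simp at h1 h2
      subst h1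
      simp [List.filter_cons, h2]

lemma getLast?_cons_ne_nil (c : Char) (t : List Char) (h : t ≠ []) :
    (c :: t).getLast? = t.getLast? := by
  cases t with
  | nil => exact absurd rfl h
  | cons x s => simp [List.getLast?_cons_cons]

lemma pvSplit_cons_slash (t : List Char) : pvSplit ('/' :: t) = [] :: pvSplit t := by
  simp [pvSplit]

lemma pvSplit_cons_ne (c : Char) (t : List Char) (hc : c ≠ '/') :
    pvSplit (c :: t) = (pvSplit t).modifyHead (c :: ·) := by
  simp [pvSplit, hc]

lemma headI_modifyHead_pvSplit (c : Char) (t : List Char) :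
    ((pvSplit t).modifyHead (c :: ·)).headI = c :: (pvSplit t).headI := by
  cases h : pvSplit t with
  | nil => exact absurd h (pvSplit_ne_nil t)
  | cons a as => simp

lemma pvRepl_head_tail (l : List Char) :
    (pvSplit (pvRepl l)).headI = (pvSplit l).headI ∧
      ((pvSplit (pvRepl l)).tail).filter (fun s => !s.isEmpty) =
        ((pvSplit l).tail).filter (fun s => !s.isEmpty) := by
  induction l using pvRepl.induct with
  | case1 => exact ⟨rfl, rfl⟩
  | case2 c => simp [pvRepl]
  | case3 c d t h1 ih =>
    obtain ⟨hc, hd⟩ := h1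
    subst hc; subst hd
    simp only [pvRepl, and_self, if_true]
    rw [pvSplit_cons_slash, pvSplit_cons_slash, pvSplit_cons_slash]
    refine ⟨rfl, ?_⟩
    simp only [List.tail_cons, List.filter_cons]
    simp only [List.isEmpty_nil, Bool.not_true, Bool.false_eq_true, if_false]
    exact filter_eq_of_head_tail _ _ (pvSplit_ne_nil _) (pvSplit_ne_nil _) ih.1 ih.2
  | case4 c d t h1 ih =>
    simp only [pvRepl, h1, if_false]
    by_cases hc : c = '/'
    · subst hc
      rw [pvSplit_cons_slash, pvSplit_cons_slash]
      refine ⟨rfl, ?_⟩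
      simp only [List.tail_cons]
      exact filter_eq_of_head_tail _ _ (pvSplit_ne_nil _) (pvSplit_ne_nil _) ih.1 ih.2
    · rw [pvSplit_cons_ne c _ hc, pvSplit_cons_ne c _ hc]
      rw [headI_modifyHead_pvSplit, headI_modifyHead_pvSplit]
      rw [List.tail_modifyHead, List.tail_modifyHead]
      exact ⟨by rw [ih.1], ih.2⟩

lemma pvSegs_pvRepl (l : List Char) : pvSegs (pvRepl l) = pvSegs l := by
  exact filter_eq_of_head_tail _ _ (pvSplit_ne_nil _) (pvSplit_ne_nil _)
    (pvRepl_head_tail l).1 (pvRepl_head_tail l).2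

lemma getLast?_pvRepl (l : List Char) : (pvRepl l).getLast? = l.getLast? := by
  induction l using pvRepl.induct with
  | case1 => rfl
  | case2 c => rfl
  | case3 c d t h1 ih =>
    obtain ⟨hc, hd⟩ := h1
    subst hc; subst hd
    simp only [pvRepl, and_self, if_true]
    cases ht : t with
    | nil => rfl
    | cons x t' =>
      rw [← ht]
      have h2 : pvRepl t ≠ [] := pvRepl_ne_nil t (by simp [ht])
      rw [getLast?_cons_ne_nil _ _ h2, ih]
      rw [getLast?_cons_ne_nil _ _ (by simp [ht]),
          getLast?_cons_ne_nil _ _ (by simp [ht])]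
  | case4 c d t h1 ih =>
    simp only [pvRepl, h1, if_false]
    have h2 : pvRepl (d :: t) ≠ [] := pvRepl_ne_nil _ (by simp)
    rw [getLast?_cons_ne_nil _ _ h2, ih,
        getLast?_cons_ne_nil c (d :: t) (by simp)]

lemma pvCollapse_spec (fuel : Nat) (l : List Char) (h : l.length < fuel) :
    pvSegs (pvCollapse fuel l) = pvSegs l ∧
      (pvCollapse fuel l).getLast? = l.getLast? ∧
      ¬ (['/', '/'] <:+: pvCollapse fuel l) := by
  induction fuel generalizing l with
  | zero => omega
  | succ n ih =>
    rw [pvCollapse]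
    by_cases hin : PySem.Chars.isIn ['/', '/'] l = true
    · simp only [hin, if_true]
      have hinf : ['/', '/'] <:+: l := (PySem.Chars.isIn_iff_infix _ _).mp hin
      rw [replace_eq_pvRepl]
      have hlt : (pvRepl l).length < n := by
        have := length_pvRepl_lt l hinf
        omega
      obtain ⟨e1, e2, e3⟩ := ih (pvRepl l) hlt
      exact ⟨by rw [e1, pvSegs_pvRepl], by rw [e2, getLast?_pvRepl], e3⟩
    · simp only [hin]
      refine ⟨rfl, rfl, ?_⟩
      rw [← PySem.Chars.isIn_iff_infix]
      simp [hin]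

lemma pvSplit_append_slash (l : List Char) : pvSplit (l ++ ['/']) = pvSplit l ++ [[]] := by
  induction l with
  | nil => simp [pvSplit]
  | cons c t ih =>
    by_cases hc : c = '/'
    · subst hc
      rw [List.cons_append, pvSplit_cons_slash, pvSplit_cons_slash, ih]
      rfl
    · rw [List.cons_append, pvSplit_cons_ne c _ hc, pvSplit_cons_ne c _ hc, ih]
      cases h : pvSplit t with
      | nil => exact absurd h (pvSplit_ne_nil t)
      | cons a as => simp

lemma pvSegs_append_slash (l : List Char) : pvSegs (l ++ ['/']) = pvSegs l := by
  unfold pvSegs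
  rw [pvSplit_append_slash]
  simp

lemma pvSegs_dropWhile_rev (m : List Char) :
    pvSegs ((m.dropWhile (· == '/')).reverse) = pvSegs m.reverse := by
  induction m with
  | nil => rfl
  | cons c t ih =>
    by_cases hc : c = '/'
    · subst hc
      rw [List.dropWhile_cons_of_pos (by simp)]
      rw [ih, List.reverse_cons, pvSegs_append_slash]
    · rw [List.dropWhile_cons_of_neg (by simp [hc])]

lemma getLast?_dropWhile_rev (m : List Char) :
    ((m.dropWhile (· == '/')).reverse).getLast? ≠ some '/' := by
  rw [List.getLast?_reverse]
  induction m with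
  | nil => simp
  | cons c t ih =>
    by_cases hc : c = '/'
    · subst hc
      rw [List.dropWhile_cons_of_pos (by simp)]
      exact ih
    · rw [List.dropWhile_cons_of_neg (by simp [hc])]
      simp [hc]

lemma no_slash_mem_pvSplit (l : List Char) (s : List Char) (hs : s ∈ pvSplit l) : '/' ∉ s := by
  induction l generalizing s with
  | nil =>
    simp [pvSplit] at hs
    simp [hs]
  | cons c t ih =>
    by_cases hc : c = '/'
    · subst hc
      rw [pvSplit_cons_slash] at hs
      rcases List.mem_cons.mp hs with h | h
      · simp [h]
      · exact ih s h
    · rw [pvSplit_cons_ne c _ hc] at hs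
      cases hsp : pvSplit t with
      | nil => exact absurd hsp (pvSplit_ne_nil t)
      | cons a as =>
        rw [hsp] at hs
        simp at hs
        rcases hs with h | h
        · subst h
          intro hmem
          rcases List.mem_cons.mp hmem with h | h
          · exact hc h.symm
          · exact ih a (by rw [hsp]; exact List.mem_cons_self) h
        · exact ih s (by rw [hsp]; exact List.mem_cons_of_mem a h)

lemma filter_pvSegs_self (l : List Char) :
    (pvSegs l).filter (fun s => !s.isEmpty) = pvSegs l := by
  unfold pvSegs
  rw [List.filter_filter]
  simp

-- structure of pvSplit on a collapsed, not-'/'-terminated string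
lemma pvSplit_structure (l : List Char) (hnd : ¬ (['/', '/'] <:+: l))
    (hlast : l.getLast? ≠ some '/') (hne : l ≠ []) :
    pvSplit l = (if l.head? = some '/' then [[]] else []) ++ pvSegs l := by
  induction l with
  | nil => exact absurd rfl hne
  | cons c t ih =>
    cases ht : t with
    | nil =>
      subst ht
      have hc : c ≠ '/' := by
        intro h
        exact hlast (by simp [h])
      rw [pvSplit_cons_ne c _ hc]
      simp [pvSplit, pvSegs, hc]
    | cons d t' =>
      rw [← ht]
      have htne : t ≠ [] := by simp [ht]
      have hlast' : t.getLast? ≠ some '/' := by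
        rw [getLast?_cons_ne_nil _ _ htne] at hlast
        exact hlast
      have hnd' : ¬ (['/', '/'] <:+: t) := by
        intro hinf
        exact hnd (List.infix_cons hinf)
      by_cases hc : c = '/'
      · subst hc
        have hd : d ≠ '/' := by
          intro h
          exact hnd ⟨[], t', by simp [ht, h]⟩
        have hth : t.head? ≠ some '/' := by simp [ht, hd]
        rw [pvSplit_cons_slash]
        rw [ih hnd' hlast' htne]
        simp only [hth, if_false]
        have hsegs : pvSegs ('/' :: t) = pvSegs t := by
          unfold pvSegs
          rw [pvSplit_cons_slash]
          simp
        rw [hsegs]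
        simp
      · rw [pvSplit_cons_ne c _ hc]
        rw [ih hnd' hlast' htne]
        have hsegs : pvSegs (c :: t) =
            (c :: (pvSplit t).headI) :: ((pvSplit t).tail.filter (fun s => !s.isEmpty)) := by
          unfold pvSegs
          rw [pvSplit_cons_ne c _ hc]
          cases hsp : pvSplit t with
          | nil => exact absurd hsp (pvSplit_ne_nil t)
          | cons a as => simp
        rw [hsegs]
        by_cases hth : t.head? = some '/'
        · have hpt : pvSplit t = [] :: pvSegs t := by
            rw [ih hnd' hlast' htne]; simp [hth]
          rw [hpt]
          simp only [List.headI_cons, List.tail_cons, hth, if_true]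
          rw [filter_pvSegs_self]
          simp [hc]
        · have hpt : pvSplit t = pvSegs t := by
            rw [ih hnd' hlast' htne]; simp [hth]
          rw [hpt]
          simp only [hth, if_false]
          cases hsg : pvSegs t with
          | nil => exact absurd (hpt.trans hsg) (pvSplit_ne_nil t)
          | cons a as =>
            have hamem : (!a.isEmpty) = true := by
              have hm : a ∈ pvSegs t := by rw [hsg]; exact List.mem_cons_self
              exact (List.mem_filter.mp hm).2
            have h5 := filter_pvSegs_self t
            rw [hsg, List.filter_cons, hamem] at h5
            simp only [if_true] at h5
            have has := (List.cons_inj_right a).mp h5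
            simp [has, hc]

lemma pvFixSegment_nil : pvFixSegment [] = [] := by
  simp [pvFixSegment, PySem.Chars.startswith, List.isPrefixOf]
  rfl

lemma replace_single_go (fuel : Nat) (l acc : List Char) (h : l.length ≤ fuel) :
    PySem.Chars.replace.go ['_'] ['-'] fuel l acc =
      acc.reverse ++ l.map (fun c => if c = '_' then '-' else c) := by
  induction fuel generalizing l acc with
  | zero =>
    have : l = [] := by cases l <;> simp_all
    subst this
    simp [PySem.Chars.replace.go]
  | succ n ih =>
    cases l with
    | nil => simp [PySem.Chars.replace.go]
    | cons c rest =>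
      by_cases hc : c = '_'
      · subst hc
        have hpre : List.isPrefixOf ['_'] ('_' :: rest) = true := by simp [List.isPrefixOf]
        rw [PySem.Chars.replace.go]
        simp only [hpre, if_true, List.length_cons, List.length_nil, List.drop_succ_cons,
          List.drop_zero]
        rw [ih rest (['-'].reverse ++ acc) (by simp at h ⊢; omega)]
        simp
      · have hpre : List.isPrefixOf ['_'] (c :: rest) = false := by
          simp [List.isPrefixOf]
          intro hh
          exact hc hh.symm
        rw [PySem.Chars.replace.go]
        simp only [hpre, Bool.false_eq_true, if_false]
        rw [ih rest (c :: acc) (by simp at h ⊢; omega)]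
        simp [hc]

lemma replace_single (l : List Char) :
    PySem.Chars.replace l ['_'] ['-'] = l.map (fun c => if c = '_' then '-' else c) := by
  rw [PySem.Chars.replace]
  simp only [List.isEmpty_cons, Bool.false_eq_true, if_false]
  rw [replace_single_go _ _ _ (Nat.le_refl _)]
  simp

lemma lowerChar_ne_slash (c : Char) (hc : c ≠ '/') : PySem.Chars.lowerChar c ≠ '/' := by
  unfold PySem.Chars.lowerChar
  split
  · rename_i hup
    unfold PySem.Chars.isupper at hup
    intro heq
    have h1 : 'A' ≤ c ∧ c ≤ 'Z' := by
      simp at hup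
      exact hup
    have h2 : 65 ≤ c.toNat ∧ c.toNat ≤ 90 := by
      obtain ⟨ha, hb⟩ := h1
      exact ⟨ha, hb⟩
    have hval : (c.toNat + 32).isValidChar := by
      left
      omega
    have h3 : (Char.ofNat (c.toNat + 32)).toNat = c.toNat + 32 := by
      rw [Char.ofNat, dif_pos hval]
      exact Char.toNat_ofNatAux hval
    have h4 : ('/' : Char).toNat = 47 := rfl
    rw [heq] at h3
    omega
  · exact hc

lemma head?_pvFixSegment (s : List Char) (hne : s ≠ []) (hns : '/' ∉ s) :
    ∃ c, (pvFixSegment s).head? = some c ∧ c ≠ '/' := by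
  cases s with
  | nil => exact absurd rfl hne
  | cons a t =>
    have ha : a ≠ '/' := fun h => hns (h ▸ List.mem_cons_self)
    unfold pvFixSegment
    split
    · exact ⟨a, rfl, ha⟩
    · rw [replace_single]
      simp only [PySem.Chars.lower, List.map_map, List.map_cons, List.head?_cons]
      refine ⟨_, rfl, ?_⟩
      by_cases h2 : PySem.Chars.lowerChar a = '_'
      · simp [h2]
      · simp [h2]
        exact lowerChar_ne_slash a ha

lemma head?_join (a : List Char) (r : List (List Char)) (ha : a ≠ []) :
    (PySem.Chars.join ['/'] (a :: r)).head? = a.head? := by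
  cases r with
  | nil => rw [PySem.Chars.join_singleton]
  | cons b bs =>
    rw [PySem.Chars.join_cons_cons, List.append_assoc]
    exact List.head?_append_of_ne_nil a ha

-- the whole computation of port A, on the character list, equals port B's computation
lemma pv_main (cs : List Char) :
    (let p1 := if PySem.Chars.endswith cs ['/'] && decide (1 < cs.length)
               then (cs.reverse.dropWhile (· == '/')).reverse else cs
     let p2 := pvCollapse (p1.length + 1) p1
     let suggested := PySem.Chars.join ['/'] ((PySem.Chars.splitOn p2 ['/']).map pvFixSegment)
     if PySem.Chars.startswith suggested ['/'] then suggested else '/' :: suggested)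
    = '/' :: PySem.Chars.join ['/'] ((pvSegs cs).map pvFixSegment) := by
  by_cases hcs : cs = ['/']
  · subst hcs
    decide
  · simp only []
    set p1 := if PySem.Chars.endswith cs ['/'] && decide (1 < cs.length)
              then (cs.reverse.dropWhile (· == '/')).reverse else cs with hp1
    have hseg1 : pvSegs p1 = pvSegs cs := by
      rw [hp1]
      split
      · have h := pvSegs_dropWhile_rev cs.reverse
        rwa [List.reverse_reverse] at h
      · rfl
    have hlast1 : p1.getLast? ≠ some '/' := by
      rw [hp1]
      split
      · exact getLast?_dropWhile_rev cs.reverse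
      · rename_i hgu
        simp only [Bool.and_eq_true, decide_eq_true_eq, not_and] at hgu
        by_cases he : PySem.Chars.endswith cs ['/'] = true
        · have hlen : ¬ (1 < cs.length) := hgu he
          intro hl
          have : cs ≠ [] := by intro h; rw [h] at hl; simp at hl
          cases cs with
          | nil => simp at hl
          | cons a t =>
            cases t with
            | nil =>
              simp at hl
              exact hcs (by rw [hl])
            | cons b u => simp at hlen
        · intro hl
          exact he ((endswith_slash_iff cs).mpr hl)
    obtain ⟨hc1, hc2, hc3⟩ := pvCollapse_spec (p1.length + 1) p1 (Nat.lt_succ_self _)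
    set p2 := pvCollapse (p1.length + 1) p1 with hp2def
    have hlast2 : p2.getLast? ≠ some '/' := by rw [hc2]; exact hlast1
    have hsegs2 : pvSegs p2 = pvSegs cs := hc1.trans hseg1
    rw [splitOn_eq_pvSplit]
    by_cases hp2 : p2 = []
    · rw [hp2] at hsegs2 ⊢
      rw [← hsegs2]
      have h1 : pvSplit ([] : List Char) = [[]] := rfl
      have h2 : pvSegs ([] : List Char) = [] := rfl
      rw [h1, h2]
      simp only [List.map_cons, List.map_nil, pvFixSegment_nil,
        PySem.Chars.join_singleton, PySem.Chars.join_nil]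
      have : PySem.Chars.startswith [] ['/'] = false := rfl
      rw [this]
      simp
    · rw [pvSplit_structure p2 hc3 hlast2 hp2]
      by_cases hh : p2.head? = some '/'
      · simp only [hh, if_true, List.singleton_append]
        have hSne : pvSegs p2 ≠ [] := by
          cases hpc : p2 with
          | nil => exact absurd hpc hp2
          | cons a t =>
            have ha : a = '/' := by rw [hpc] at hh; simpa using hh
            subst ha
            have hstr := pvSplit_structure p2 hc3 hlast2 hp2
            rw [hpc, pvSplit_cons_slash] at hstr
            rw [hpc] at hh
            simp only [hh, if_true, List.singleton_append] at hstr
            intro hnil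
            rw [hnil] at hstr
            exact pvSplit_ne_nil t (List.cons_inj_right _ |>.mp hstr)
        cases hS : pvSegs p2 with
        | nil => exact absurd hS hSne
        | cons m ms =>
          rw [List.map_cons, pvFixSegment_nil, List.map_cons, PySem.Chars.join_cons_cons]
          simp only [List.nil_append, List.singleton_append]
          have hsw : PySem.Chars.startswith
              ('/' :: PySem.Chars.join ['/'] (pvFixSegment m :: ms.map pvFixSegment)) ['/'] = true := by
            rw [startswith_slash_iff]; rfl
          rw [hsw]
          simp only [if_true]
          rw [← List.map_cons, ← hS, hsegs2]
      · simp only [hh, if_false, List.nil_append]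
        cases hS : pvSegs p2 with
        | nil =>
          have := pvSplit_structure p2 hc3 hlast2 hp2
          rw [hS] at this
          simp only [hh, if_false, List.nil_append] at this
          exact absurd this (pvSplit_ne_nil p2)
        | cons m ms =>
          have hmmem : m ∈ pvSplit p2 := by
            rw [pvSplit_structure p2 hc3 hlast2 hp2, hS]
            simp [hh]
          have hmne : m ≠ [] := by
            have : m ∈ pvSegs p2 := by rw [hS]; exact List.mem_cons_self
            have := (List.mem_filter.mp this).2
            simpa using this
          have hmns : '/' ∉ m := no_slash_mem_pvSplit p2 m hmmem
          obtain ⟨c, hc, hcne⟩ := head?_pvFixSegment m hmne hmns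
          have hfne : pvFixSegment m ≠ [] := by
            intro h; rw [h] at hc; simp at hc
          have hsw : PySem.Chars.startswith
              (PySem.Chars.join ['/'] ((m :: ms).map pvFixSegment)) ['/'] = false := by
            rw [Bool.eq_false_iff]
            intro habs
            rw [startswith_slash_iff, List.map_cons, head?_join _ _ hfne, hc] at habs
            exact hcne (by injection habs)
          rw [hsw]
          simp only [Bool.false_eq_true, if_false]
          rw [← hS, hsegs2]

-- ===== VERDICT (by name: the statement is the Claim_ definition above) =====
theorem suggest_valid_path_spec : Claim_equal_suggest_valid_path := by
  intro path _
  show suggest_valid_path path = suggest_valid_path_alt path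
  unfold suggest_valid_path suggest_valid_path_alt
  refine congrArg String.ofList ?_
  have hmain := pv_main path.toList
  simp only [splitOn_eq_pvSplit] at hmain ⊢
  exact hmain
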